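-- pv_equiv track=rewrite | github.com/areizas/coding-challenges | python/hackerrank/dna-health.py | getHealth
-- ===== SOURCE A (Python) =====
-- def getHealth(genes, health, first, last, gen):
--     genHealth = 0
--
--     subHealth = health[first:last + 1]
--     subGenes = genes[first:last + 1]
--
--     subHealths = {}
--     letterN = []
--
--     for i in range(len(subHealth)):
--         if not subGenes[i] in subHealths:
--             subHealths[subGenes[i]] = subHealth[i]
--         else:
--             subHealths[subGenes[i]] += subHealth[i]
--
--         letterN.append(len(subGenes[i]))
--
--     letterN = set(letterN)
--
--     genHealth = cropGen2(gen, subHealths, letterN)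
--
--     return genHealth
--
-- def cropGen2(gen, subHealths, letterN):
--     genHealth = 0
--
--     for nL in letterN:
--         for i in range(0, len(gen) - nL + 1):
--             if (gen[i:i + nL] in subHealths):
--                 genHealth += subHealths[gen[i:i + nL]]
--
--     return genHealth
-- ===== SOURCE B (Python) =====
-- def getHealth(genes, health, first, last, gen):
--     total = 0
--     n = len(gen)
--     for g, h in zip(genes[first:last + 1], health[first:last + 1]):
--         m = len(g)
--         count = 0
--         for i in range(n - m + 1):
--             if gen[i:i + m] == g:
--                 count += 1
--         total += h * count
--     return total
-- ===== Notes on version B (the rewrite author's own statement) =====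
-- stated objective: simpler
-- what changed: B drops A's gene->summed-health dictionary and the per-distinct-length rescans of gen, and instead directly counts the overlapping occurrences of each (gene, health) pair in gen and sums health*count in one pass over the pairs.
import Mathlib
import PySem

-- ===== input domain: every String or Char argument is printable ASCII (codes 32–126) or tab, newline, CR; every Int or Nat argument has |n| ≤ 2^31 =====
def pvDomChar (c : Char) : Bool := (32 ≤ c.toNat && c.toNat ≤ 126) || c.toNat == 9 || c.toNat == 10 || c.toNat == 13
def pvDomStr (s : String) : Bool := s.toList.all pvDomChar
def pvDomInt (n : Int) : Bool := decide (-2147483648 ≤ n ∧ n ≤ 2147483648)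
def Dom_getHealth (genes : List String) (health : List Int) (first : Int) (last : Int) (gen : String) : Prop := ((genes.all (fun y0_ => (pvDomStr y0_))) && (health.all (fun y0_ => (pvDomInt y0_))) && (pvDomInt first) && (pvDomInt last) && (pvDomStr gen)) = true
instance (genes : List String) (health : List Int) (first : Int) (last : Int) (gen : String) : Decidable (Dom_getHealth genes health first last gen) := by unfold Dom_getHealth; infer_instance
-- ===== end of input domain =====

-- B replaces A's health dictionary + per-distinct-length rescans of gen with a direct
-- per-(gene, health) overlapping-occurrence count; return values agree wherever A returns.

-- ===== PORT A =====
def cropGen2 (gen : String) (subHealths : PySem.Dict String Int) (letterN : PySem.Set Int) : Int :=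
  letterN.foldl (fun genHealth nL =>
    (PySem.List.pyRange 0 (PySem.Str.len gen - nL + 1) 1).foldl (fun gh i =>
      match subHealths.get? (PySem.Str.slice gen (some i) (some (i + nL))) with
      | some v => gh + v
      | none => gh) genHealth) 0

def getHealth (genes : List String) (health : List Int) (first : Int) (last : Int) (gen : String) : Int :=
  let subHealth := PySem.List.slice health (some first) (some (last + 1))
  let subGenes := PySem.List.slice genes (some first) (some (last + 1))
  -- the loop builds subHealths and letterN together; pyGetD is total (Pre_ keeps the index in range)
  let st := (List.range subHealth.length).foldl
    (fun (st : PySem.Dict String Int × List Int) i =>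
      (match st.1.get? (PySem.List.pyGetD subGenes (i : Int) "") with
       | none => st.1.insert (PySem.List.pyGetD subGenes (i : Int) "") (PySem.List.pyGetD subHealth (i : Int) 0)
       | some x => st.1.insert (PySem.List.pyGetD subGenes (i : Int) "") (x + PySem.List.pyGetD subHealth (i : Int) 0),
       st.2 ++ [PySem.Str.len (PySem.List.pyGetD subGenes (i : Int) "")]))
    (PySem.Dict.empty, [])
  cropGen2 gen st.1 (PySem.Set.ofList st.2)

-- ===== PORT B =====
def occCount (gen : String) (g : String) : Int :=
  (PySem.List.pyRange 0 (PySem.Str.len gen - PySem.Str.len g + 1) 1).foldl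
    (fun count i => if PySem.Str.slice gen (some i) (some (i + PySem.Str.len g)) == g then count + 1 else count) 0

def getHealth_alt (genes : List String) (health : List Int) (first : Int) (last : Int) (gen : String) : Int :=
  ((PySem.List.slice genes (some first) (some (last + 1))).zip
   (PySem.List.slice health (some first) (some (last + 1)))).foldl
    (fun total p => total + p.2 * occCount gen p.1) 0

-- ===== PRECONDITION & SPEC =====
-- A raises IndexError exactly when the genes slice is shorter than the health slice
-- (it indexes subGenes[i] for every i below len(subHealth)); Pre_ excludes exactly those inputs.
def Pre_getHealth (genes : List String) (health : List Int) (first : Int) (last : Int) (gen : String) : Prop :=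
  (PySem.List.slice health (some first) (some (last + 1))).length ≤
    (PySem.List.slice genes (some first) (some (last + 1))).length
instance (genes : List String) (health : List Int) (first : Int) (last : Int) (gen : String) : Decidable (Pre_getHealth genes health first last gen) := by unfold Pre_getHealth; infer_instance

def pvWitness_getHealth : List String × List Int × Int × Int × String := (["a", "b"], [1, 2], 0, 1, "ab")


def Spec_getHealth (genes : List String) (health : List Int) (first : Int) (last : Int) (gen : String) (out : Int) : Prop := out = getHealth_alt genes health first last gen
instance (genes : List String) (health : List Int) (first : Int) (last : Int) (gen : String) (out : Int) : Decidable (Spec_getHealth genes health first last gen out) := by unfold Spec_getHealth; infer_instance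

-- ===== CLAIM (what is proved, stated in full; the proofs are below) =====
def Claim_equal_getHealth : Prop := ∀ (genes : List String) (health : List Int) (first : Int) (last : Int) (gen : String), Dom_getHealth genes health first last gen → Pre_getHealth genes health first last gen → Spec_getHealth genes health first last gen (getHealth genes health first last gen)


-- ===== LEMMAS AND PROOFS =====

-- sum of the healths of the pairs whose gene equals w (what A's dict stores under w)
def Spairs (ps : List (String × Int)) (w : String) : Int :=
  (ps.map (fun p => if p.1 = w then p.2 else 0)).sum

-- A's dict-building step, on one (gene, health) pair
def stepD (d : PySem.Dict String Int) (p : String × Int) : PySem.Dict String Int :=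
  match d.get? p.1 with
  | none => d.insert p.1 p.2
  | some x => d.insert p.1 (x + p.2)

lemma get?_foldl_stepD (ps : List (String × Int)) (d : PySem.Dict String Int) (w : String) :
    (ps.foldl stepD d).get? w =
      match d.get? w with
      | some x => some (x + Spairs ps w)
      | none => if w ∈ ps.map Prod.fst then some (Spairs ps w) else none := by
  induction ps generalizing d with
  | nil => cases h : d.get? w <;> simp [Spairs, h]
  | cons p ps ih =>
    simp only [List.foldl_cons, ih]
    by_cases hw : p.1 = w
    · subst hw
      have hS : Spairs (p :: ps) p.1 = p.2 + Spairs ps p.1 := by simp [Spairs]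
      cases h : d.get? p.1 with
      | none =>
        simp only [stepD, h]
        rw [PySem.Dict.get?_insert_self]
        simp [hS, h]
      | some x =>
        simp only [stepD, h]
        rw [PySem.Dict.get?_insert_self]
        simp [hS, h]
        ring
    · have hS : Spairs (p :: ps) w = Spairs ps w := by simp [Spairs, hw]
      have hget : (stepD d p).get? w = d.get? w := by
        unfold stepD
        cases h : d.get? p.1 <;> exact PySem.Dict.get?_insert_of_ne _ _ (fun he => hw he.symm)
      rw [hget, hS]
      cases h : d.get? w with
      | none =>
        by_cases hm : w ∈ List.map Prod.fst ps
        · simp [hm]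
        · simp [hm, Ne.symm hw]
      | some x => simp [h]

lemma match_dict_add (ps : List (String × Int)) (w : String) (gh : Int) :
    (match (ps.foldl stepD PySem.Dict.empty).get? w with
     | some v => gh + v
     | none => gh) = gh + Spairs ps w := by
  rw [get?_foldl_stepD, PySem.Dict.get?_empty]
  by_cases hm : w ∈ ps.map Prod.fst
  · simp [hm]
  · have hz : ∀ p ∈ ps, (if p.1 = w then p.2 else 0) = 0 := by
      intro p hp
      have hne : p.1 ≠ w := fun he => hm (he ▸ List.mem_map_of_mem hp)
      simp [hne]
    have hS : Spairs ps w = 0 := by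
      unfold Spairs; rw [List.map_congr_left hz]; simp
    simp [hm, hS]

lemma sum_sum_comm {α β : Type} (l : List α) (m : List β) (f : α → β → Int) :
    (l.map (fun x => (m.map (fun y => f x y)).sum)).sum
      = (m.map (fun y => (l.map (fun x => f x y)).sum)).sum := by
  induction l with
  | nil => simp
  | cons x l ih => simp [ih, List.sum_map_add]

lemma sum_ite_const {α : Type} (l : List α) (q : α → Prop) [DecidablePred q] (c : Int) :
    (l.map (fun x => if q x then c else 0)).sum = c * (l.countP (fun x => decide (q x)) : Int) := by
  induction l with
  | nil => simp
  | cons x l ih => by_cases h : q x <;> simp [h, ih] <;> ring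

lemma len_slice_window (gen : String) (nL i : Int) (h0 : 0 ≤ nL) (hi : 0 ≤ i)
    (hub : i + nL ≤ PySem.Str.len gen) :
    PySem.Str.len (PySem.Str.slice gen (some i) (some (i + nL))) = nL := by
  rw [PySem.Str.len_eq, PySem.Str.toList_slice, PySem.Chars.slice_eq_listSlice,
      PySem.List.slice_toNat _ hi (by omega : (0:Int) ≤ i + nL)]
  rw [PySem.Str.len_eq] at hub
  simp only [List.length_take, List.length_drop]
  omega

lemma occCount_eq_countP (gen g : String) :
    occCount gen g =
      ((PySem.List.pyRange 0 (PySem.Str.len gen - PySem.Str.len g + 1) 1).countP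
        (fun i => PySem.Str.slice gen (some i) (some (i + PySem.Str.len g)) == g) : Int) := by
  unfold occCount
  rw [PySem.List.foldl_if_add_one]
  simp

lemma per_length_sum (gen : String) (ps : List (String × Int)) (nL : Int) (h0 : 0 ≤ nL) :
    ((PySem.List.pyRange 0 (PySem.Str.len gen - nL + 1) 1).map
        (fun i => Spairs ps (PySem.Str.slice gen (some i) (some (i + nL))))).sum
      = (ps.map (fun p => if PySem.Str.len p.1 = nL then p.2 * occCount gen p.1 else 0)).sum := by
  unfold Spairs
  rw [sum_sum_comm]
  refine congrArg List.sum (List.map_congr_left ?_)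
  intro p _
  by_cases hlen : PySem.Str.len p.1 = nL
  · rw [sum_ite_const (q := fun i => p.1 = PySem.Str.slice gen (some i) (some (i + nL)))]
    rw [occCount_eq_countP, hlen, if_pos rfl]
    congr 1
    have hc : List.countP (fun x => decide (p.1 = PySem.Str.slice gen (some x) (some (x + nL))))
          (PySem.List.pyRange 0 (PySem.Str.len gen - nL + 1) 1)
        = List.countP (fun i => PySem.Str.slice gen (some i) (some (i + nL)) == p.1)
          (PySem.List.pyRange 0 (PySem.Str.len gen - nL + 1) 1) := by
      apply List.countP_congr
      intro i _
      by_cases h : p.1 = PySem.Str.slice gen (some i) (some (i + nL))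
      · simp [h]
      · simp [h, Ne.symm h]
    exact_mod_cast hc
  · have hz : ∀ i ∈ PySem.List.pyRange 0 (PySem.Str.len gen - nL + 1) 1,
        (if p.1 = PySem.Str.slice gen (some i) (some (i + nL)) then p.2 else 0) = 0 := by
      intro i hi
      rw [PySem.List.mem_pyRange_one] at hi
      have hne : p.1 ≠ PySem.Str.slice gen (some i) (some (i + nL)) := by
        intro he
        exact hlen (by rw [he]; exact len_slice_window gen nL i h0 hi.1 (by omega))
      simp [hne]
    rw [List.map_congr_left hz, if_neg hlen]
    simp

lemma distinct_length_sum {α : Type} (ps : List α) (key : α → Int) (g : α → Int) :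
    ((PySem.Set.ofList (ps.map key)).map
        (fun nL => (ps.map (fun p => if key p = nL then g p else 0)).sum)).sum
      = (ps.map g).sum := by
  rw [sum_sum_comm]
  refine congrArg List.sum (List.map_congr_left ?_)
  intro p hp
  rw [sum_ite_const (q := fun nL => key p = nL)]
  have hmem : key p ∈ PySem.Set.ofList (ps.map key) :=
    (PySem.Set.mem_ofList _ _).2 (List.mem_map_of_mem hp)
  have hcnt : (PySem.Set.ofList (ps.map key)).countP (fun nL => decide (key p = nL)) = 1 := by
    have hfun : (fun nL => decide (key p = nL)) = (fun nL => nL == key p) := by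
      funext nL; by_cases h : nL = key p <;> simp [h, Ne.symm]
    rw [hfun, ← List.count]
    exact List.count_eq_one_of_mem (PySem.Set.nodup_ofList _) hmem
  rw [hcnt]
  ring

lemma zip_eq_map_range {α β : Type} (sg : List α) (sh : List β) (d1 : α) (d2 : β)
    (h : sh.length ≤ sg.length) :
    sg.zip sh = (List.range sh.length).map (fun i => (sg.getD i d1, sh.getD i d2)) := by
  apply List.ext_getElem
  · simp; omega
  · intro i h1 h2
    simp at h1
    simp [List.getElem_zip, List.getD_eq_getElem?_getD, h1]

lemma foldA_eq (sg : List String) (sh : List Int) (h : sh.length ≤ sg.length) :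
    (List.range sh.length).foldl
      (fun (st : PySem.Dict String Int × List Int) i =>
        (match st.1.get? (PySem.List.pyGetD sg (i : Int) "") with
         | none => st.1.insert (PySem.List.pyGetD sg (i : Int) "") (PySem.List.pyGetD sh (i : Int) 0)
         | some x => st.1.insert (PySem.List.pyGetD sg (i : Int) "") (x + PySem.List.pyGetD sh (i : Int) 0),
         st.2 ++ [PySem.Str.len (PySem.List.pyGetD sg (i : Int) "")]))
      (PySem.Dict.empty, [])
    = ((sg.zip sh).foldl stepD PySem.Dict.empty,
       (sg.zip sh).map (fun p => PySem.Str.len p.1)) := by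
  have h2 : (sg.zip sh).map (fun p => PySem.Str.len p.1)
      = (sg.zip sh).foldl (fun ln p => ln ++ [PySem.Str.len p.1]) [] := by
    rw [PySem.List.foldl_append_singleton_eq_map]
    rfl
  rw [h2, ← PySem.List.foldl_prod_mk stepD (fun ln p => ln ++ [PySem.Str.len p.1])]
  rw [zip_eq_map_range sg sh "" 0 h, List.foldl_map]
  simp only [List.pure_def, List.bind_eq_flatMap]
  have hflat : List.flatMap (fun a : ℕ => [(a : Int)]) (List.range sh.length)
      = List.map (fun a : ℕ => (a : Int)) (List.range sh.length) := by
    rw [← List.map_eq_flatMap]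
  rw [hflat, List.foldl_map]
  simp only [PySem.List.pyGetD_natCast]
  rfl

lemma cropGen2_eval (gen : String) (ps : List (String × Int)) :
    cropGen2 gen (ps.foldl stepD PySem.Dict.empty)
        (PySem.Set.ofList (ps.map (fun p => PySem.Str.len p.1)))
      = (ps.map (fun p => p.2 * occCount gen p.1)).sum := by
  unfold cropGen2
  have hinner : (fun (genHealth : Int) (nL : Int) =>
      (PySem.List.pyRange 0 (PySem.Str.len gen - nL + 1) 1).foldl (fun gh i =>
        match (ps.foldl stepD PySem.Dict.empty).get?
            (PySem.Str.slice gen (some i) (some (i + nL))) with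
        | some v => gh + v
        | none => gh) genHealth)
      = (fun genHealth nL => genHealth +
          ((PySem.List.pyRange 0 (PySem.Str.len gen - nL + 1) 1).map
            (fun i => Spairs ps (PySem.Str.slice gen (some i) (some (i + nL))))).sum) := by
    funext genHealth nL
    have hb : (fun (gh : Int) (i : Int) =>
        match (ps.foldl stepD PySem.Dict.empty).get?
            (PySem.Str.slice gen (some i) (some (i + nL))) with
        | some v => gh + v
        | none => gh)
        = (fun gh i => gh + Spairs ps (PySem.Str.slice gen (some i) (some (i + nL)))) := by
      funext gh i
      exact match_dict_add ps _ gh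
    rw [hb, PySem.List.foldl_add]
  rw [hinner, PySem.List.foldl_add, zero_add]
  rw [List.map_congr_left (fun nL hnl => per_length_sum gen ps nL (by
    rcases (PySem.Set.mem_ofList _ _).1 hnl with hmem
    rcases List.mem_map.1 hmem with ⟨p, _, hp⟩
    rw [← hp, PySem.Str.len_eq]
    exact Int.natCast_nonneg _))]
  exact distinct_length_sum ps (fun p => PySem.Str.len p.1) (fun p => p.2 * occCount gen p.1)

-- ===== VERDICT (by name: the statement is the Claim_ definition above) =====
theorem getHealth_spec : Claim_equal_getHealth := by
  intro genes health first last gen _ hpre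
  unfold Pre_getHealth at hpre
  unfold Spec_getHealth
  simp only [getHealth, getHealth_alt]
  rw [foldA_eq _ _ hpre, cropGen2_eval, PySem.List.foldl_add, zero_add]
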